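-- pv_equiv track=rewrite | github.com/jpostigo1/NLP_Project1 | textModifiers.py | GetComparativeFreqs
-- ===== SOURCE A (Python) =====
-- def GetComparativeFreqs(words1, words2):
--     # words1 and words2 are lists of dictionaries of {word: freq} entries
--     # return two lists of dictionaries with the adjusted frequencies
--     # for example, if words1 is [{"dog": 5}] and words2 is [{"dog": 2}]
--     # then return words1 as {("dog": 3}] and words2 as []
--     new_words1 = {}
--     for word, freq in words1.items():
--         if word in words2.keys():
--             new_freq = freq - words2[word]
--             if new_freq > 0:
--                 new_words1[word] = new_freq
--         else:
--             new_words1[word] = freq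
--
--     new_words2 = {}
--     for word, freq in words2.items():
--         if word in words1.keys():
--             new_freq = freq - words1[word]
--             if new_freq > 0:
--                 new_words2[word] = new_freq
--         else:
--             new_words2[word] = freq
--
--     return new_words1, new_words2
-- ===== SOURCE B (Python) =====
-- def GetComparativeFreqs(words1, words2):
--     # One symmetric helper used in both directions: copy one dict and
--     # subtract the other in place, deleting entries that drop to <= 0.
--     def subtract(a, b):
--         out = dict(a)
--         for word, freq in b.items():
--             if word in out:
--                 diff = out[word] - freq
--                 if diff > 0:
--                     out[word] = diff
--                 else:
--                     del out[word]
--         return out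
--     return subtract(words1, words2), subtract(words2, words1)
-- ===== Notes on version B (the rewrite author's own statement) =====
-- stated objective: simpler
-- what changed: A duplicates a filtering loop twice (scan one dict, branch on membership in the other, insert positive differences); B defines one symmetric helper that copies a dict and subtracts the other in place, updating or deleting entries, and applies it in both directions.
import Mathlib
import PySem

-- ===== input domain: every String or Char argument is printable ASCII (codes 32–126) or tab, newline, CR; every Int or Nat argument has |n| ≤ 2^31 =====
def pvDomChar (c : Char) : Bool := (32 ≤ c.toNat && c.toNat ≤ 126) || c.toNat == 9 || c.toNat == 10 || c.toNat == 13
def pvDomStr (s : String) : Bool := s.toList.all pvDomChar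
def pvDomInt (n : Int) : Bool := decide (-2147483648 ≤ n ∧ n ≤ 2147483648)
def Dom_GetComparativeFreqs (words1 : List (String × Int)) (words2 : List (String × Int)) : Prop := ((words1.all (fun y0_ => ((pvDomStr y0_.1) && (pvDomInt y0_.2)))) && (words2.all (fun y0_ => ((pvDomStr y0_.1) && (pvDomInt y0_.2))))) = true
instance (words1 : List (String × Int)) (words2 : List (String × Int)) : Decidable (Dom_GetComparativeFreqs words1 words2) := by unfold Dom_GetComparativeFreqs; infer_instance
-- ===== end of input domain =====

-- B replaces A's two copy-pasted filtering loops by one symmetric in-place-subtraction helper applied in both directions (same cost, shorter code).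

-- ===== PORT A =====
-- the two 'word in otherdict.keys() … otherdict[word]' steps are ported as one match on get? (some = member, value is the lookup)
def GetComparativeFreqs (words1 : List (String × Int)) (words2 : List (String × Int)) : (List (String × Int)) × (List (String × Int)) :=
  let new_words1 := words1.foldl (fun new_words1 wf =>
      match (PySem.Dict.mk words2).get? wf.1 with
      | some v => if wf.2 - v > 0 then new_words1.insert wf.1 (wf.2 - v) else new_words1
      | none => new_words1.insert wf.1 wf.2) PySem.Dict.empty
  let new_words2 := words2.foldl (fun new_words2 wf =>
      match (PySem.Dict.mk words1).get? wf.1 with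
      | some v => if wf.2 - v > 0 then new_words2.insert wf.1 (wf.2 - v) else new_words2
      | none => new_words2.insert wf.1 wf.2) PySem.Dict.empty
  (new_words1.items, new_words2.items)

-- ===== PORT B =====
-- loop body of Source B's 'subtract' helper
def pvStep (out : PySem.Dict String Int) (wf : String × Int) : PySem.Dict String Int :=
  match out.get? wf.1 with
  | some v => if v - wf.2 > 0 then out.insert wf.1 (v - wf.2) else out.erase wf.1
  | none => out

-- Source B's 'subtract(a, b)': copy a, subtract b in place
def pvSubtract (a : List (String × Int)) (b : List (String × Int)) : List (String × Int) :=
  (b.foldl pvStep (PySem.Dict.mk a)).items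

def GetComparativeFreqs_alt (words1 : List (String × Int)) (words2 : List (String × Int)) : (List (String × Int)) × (List (String × Int)) :=
  (pvSubtract words1 words2, pvSubtract words2 words1)

-- ===== PRECONDITION & SPEC =====
-- Pre_ excludes association lists with duplicate keys: they represent no Python dict
-- (A's parameters are dicts), so their collapse order is an artefact of the encoding.
def Pre_GetComparativeFreqs (words1 : List (String × Int)) (words2 : List (String × Int)) : Prop :=
  (words1.map Prod.fst).Nodup ∧ (words2.map Prod.fst).Nodup
instance (words1 : List (String × Int)) (words2 : List (String × Int)) : Decidable (Pre_GetComparativeFreqs words1 words2) := by unfold Pre_GetComparativeFreqs; infer_instance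

def pvWitness_GetComparativeFreqs : (List (String × Int)) × (List (String × Int)) :=
  ([("dog", 5), ("cat", 2)], [("dog", 2), ("owl", 7)])

def Spec_GetComparativeFreqs (words1 : List (String × Int)) (words2 : List (String × Int)) (out : (List (String × Int)) × (List (String × Int))) : Prop := out = GetComparativeFreqs_alt words1 words2
instance (words1 : List (String × Int)) (words2 : List (String × Int)) (out : (List (String × Int)) × (List (String × Int))) : Decidable (Spec_GetComparativeFreqs words1 words2 out) := by unfold Spec_GetComparativeFreqs; infer_instance

-- ===== CLAIM (what is proved, stated in full; the proofs are below) =====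
def Claim_equal_GetComparativeFreqs : Prop := ∀ (words1 : List (String × Int)) (words2 : List (String × Int)), Dom_GetComparativeFreqs words1 words2 → Pre_GetComparativeFreqs words1 words2 → Spec_GetComparativeFreqs words1 words2 (GetComparativeFreqs words1 words2)

-- ===== LEMMAS AND PROOFS =====

-- the common value both ports compute: keep each entry of a, reduced by its b-frequency, if positive or unmatched
def pvAdj (b : List (String × Int)) (wf : String × Int) : Option (String × Int) :=
  match (PySem.Dict.mk b).get? wf.1 with
  | some v => if wf.2 - v > 0 then some (wf.1, wf.2 - v) else none
  | none => some wf

-- A's loop over a (against fixed dict b) appends exactly the adjusted entries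
theorem pvA_loop (b : List (String × Int)) :
    ∀ (a : List (String × Int)) (acc : PySem.Dict String Int),
    (a.map Prod.fst).Nodup → (∀ p ∈ a, acc.contains p.1 = false) →
    (a.foldl (fun d wf =>
      match (PySem.Dict.mk b).get? wf.1 with
      | some v => if wf.2 - v > 0 then d.insert wf.1 (wf.2 - v) else d
      | none => d.insert wf.1 wf.2) acc).items = acc.items ++ a.filterMap (pvAdj b) := by
  intro a
  induction a with
  | nil => intro acc _ _; simp
  | cons p t ih =>
    intro acc hnd hfresh
    obtain ⟨w, f⟩ := p
    have hw : w ∉ t.map Prod.fst := by simpa using (List.nodup_cons.mp hnd).1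
    have hndt : (t.map Prod.fst).Nodup := (List.nodup_cons.mp hnd).2
    have hacc : acc.contains w = false := hfresh (w, f) (by simp)
    simp only [List.foldl_cons, List.filterMap_cons]
    cases hg : (PySem.Dict.mk b).get? w with
    | none =>
      dsimp only
      rw [ih (acc.insert w f) hndt ?fresh]
      · have hadj : pvAdj b (w, f) = some (w, f) := by simp [pvAdj, hg]
        simp [hadj, PySem.Dict.items_insert_of_not_contains _ _ hacc]
      case fresh =>
        intro q hq
        rw [PySem.Dict.contains_insert]
        have : q.1 ≠ w := by
          intro h; exact hw (h ▸ List.mem_map_of_mem hq)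
        simp [this, hfresh q (List.mem_cons_of_mem _ hq)]
    | some v =>
      dsimp only
      by_cases hpos : f - v > 0
      · rw [if_pos hpos, ih (acc.insert w (f - v)) hndt ?fresh]
        · have hadj : pvAdj b (w, f) = some (w, f - v) := by simp [pvAdj, hg]; omega
          simp [hadj, PySem.Dict.items_insert_of_not_contains _ _ hacc]
        case fresh =>
          intro q hq
          rw [PySem.Dict.contains_insert]
          have : q.1 ≠ w := by
            intro h; exact hw (h ▸ List.mem_map_of_mem hq)
          simp [this, hfresh q (List.mem_cons_of_mem _ hq)]
      · rw [if_neg hpos, ih acc hndt (fun q hq => hfresh q (List.mem_cons_of_mem _ hq))]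
        have hadj : pvAdj b (w, f) = none := by simp [pvAdj, hg]; omega
        simp [hadj]

theorem pvStep_nodup (d : PySem.Dict String Int) (wf : String × Int) (hd : d.keys.Nodup) :
    (pvStep d wf).keys.Nodup := by
  unfold pvStep
  cases hg : d.get? wf.1 with
  | none => exact hd
  | some v =>
    dsimp only
    split_ifs
    · exact PySem.Dict.nodup_keys_insert _ _ _ hd
    · exact (List.filter_sublist.map _).nodup hd

theorem pvAdj_cons_congr (w0 : String) (f0 : Int) (b' t : List (String × Int))
    (ht : ∀ p ∈ t, p.1 ≠ w0) :
    t.filterMap (pvAdj ((w0, f0) :: b')) = t.filterMap (pvAdj b') := by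
  apply List.filterMap_congr
  intro p hp
  have := ht p hp
  simp [pvAdj, PySem.Dict.get?_mk_cons, Ne.symm this]

theorem pvStep_shift (w0 : String) (f0 : Int) (b' : List (String × Int))
    (d : PySem.Dict String Int) (hd : d.keys.Nodup) (hw : w0 ∉ b'.map Prod.fst) :
    d.items.filterMap (pvAdj ((w0, f0) :: b')) = (pvStep d (w0, f0)).items.filterMap (pvAdj b') := by
  have hb'none : (PySem.Dict.mk b').get? w0 = none := by
    rw [PySem.Dict.get?_eq_none_iff_not_mem_keys]
    simpa [PySem.Dict.keys] using hw
  unfold pvStep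
  cases hg : d.get? w0 with
  | none =>
    apply pvAdj_cons_congr
    intro p hp h
    rw [PySem.Dict.get?_eq_none_iff_not_mem_keys] at hg
    exact hg (h ▸ PySem.Dict.mem_keys_of_mem_items _ hp)
  | some v =>
    dsimp only
    have hmem : (w0, v) ∈ d.items := PySem.Dict.mem_items_of_get?_eq_some _ hg
    obtain ⟨l⟩ := d
    simp only [] at hmem ⊢
    obtain ⟨l1, l2, rfl⟩ := List.append_of_mem hmem
    have hnd : (List.map Prod.fst (l1 ++ (w0, v) :: l2)).Nodup := by simpa [PySem.Dict.keys] using hd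
    rw [List.map_append, List.map_cons] at hnd
    have h1 : ∀ p ∈ l1, p.1 ≠ w0 := by
      intro p hp h
      exact (List.nodup_append.mp hnd).2.2 p.1 (List.mem_map_of_mem hp) w0 (by simp) h
    have h2 : ∀ p ∈ l2, p.1 ≠ w0 := by
      intro p hp h
      exact (List.nodup_cons.mp (List.nodup_append.mp hnd).2.1).1
        (by rw [← h]; exact List.mem_map.mpr ⟨p, hp, rfl⟩)
    have hcont : (PySem.Dict.mk (l1 ++ (w0, v) :: l2)).contains w0 = true := by
      simp [PySem.Dict.contains]
    have hAdjHead : pvAdj ((w0, f0) :: b') (w0, v) =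
        if v - f0 > 0 then some (w0, v - f0) else none := by
      simp [pvAdj, PySem.Dict.get?_mk_cons]
    by_cases hpos : v - f0 > 0
    · rw [if_pos hpos, PySem.Dict.items_insert_of_contains _ _ hcont]
      simp only [List.map_append, List.map_cons, BEq.rfl, if_pos,
        List.filterMap_append, List.filterMap_cons]
      have e1 : l1.map (fun p => if p.1 == w0 then (w0, v - f0) else p) = l1 := by
        conv_rhs => rw [← List.map_id l1]
        exact List.map_congr_left (fun p hp => by simp [h1 p hp])
      have e2 : l2.map (fun p => if p.1 == w0 then (w0, v - f0) else p) = l2 := by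
        conv_rhs => rw [← List.map_id l2]
        exact List.map_congr_left (fun p hp => by simp [h2 p hp])
      rw [e1, e2, hAdjHead, if_pos hpos,
        pvAdj_cons_congr w0 f0 b' l1 h1, pvAdj_cons_congr w0 f0 b' l2 h2]
      have : pvAdj b' (w0, v - f0) = some (w0, v - f0) := by simp [pvAdj, hb'none]
      simp [this]
    · rw [if_neg hpos]
      simp only [PySem.Dict.erase, List.filter_append, List.filter_cons,
        List.filterMap_append, List.filterMap_cons]
      have e1 : l1.filter (fun p => !(p.1 == w0)) = l1 :=
        List.filter_eq_self.mpr (fun p hp => by simp [h1 p hp])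
      have e2 : l2.filter (fun p => !(p.1 == w0)) = l2 :=
        List.filter_eq_self.mpr (fun p hp => by simp [h2 p hp])
      rw [hAdjHead, if_neg hpos]
      simp [e1, e2, pvAdj_cons_congr w0 f0 b' l1 h1, pvAdj_cons_congr w0 f0 b' l2 h2]

theorem pvB_loop : ∀ (b : List (String × Int)) (d : PySem.Dict String Int),
    (b.map Prod.fst).Nodup → d.keys.Nodup →
    (b.foldl pvStep d).items = d.items.filterMap (pvAdj b) := by
  intro b
  induction b with
  | nil =>
    intro d _ _
    simp only [List.foldl_nil]
    have : ∀ p : String × Int, pvAdj [] p = some p := by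
      intro p; simp [pvAdj, PySem.Dict.get?]
    simp [this]
  | cons q b' ih =>
    intro d hnd hd
    obtain ⟨w0, f0⟩ := q
    have hw : w0 ∉ b'.map Prod.fst := by simpa using (List.nodup_cons.mp hnd).1
    rw [List.foldl_cons, ih (pvStep d (w0, f0)) (List.nodup_cons.mp hnd).2 (pvStep_nodup d _ hd),
      ← pvStep_shift w0 f0 b' d hd hw]

-- ===== VERDICT (by name: the statement is the Claim_ definition above) =====
theorem GetComparativeFreqs_spec : Claim_equal_GetComparativeFreqs := by
  intro words1 words2 _ hpre
  simp only [Spec_GetComparativeFreqs, GetComparativeFreqs, GetComparativeFreqs_alt, pvSubtract]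
  rw [pvA_loop words2 words1 PySem.Dict.empty hpre.1 (fun p _ => PySem.Dict.contains_empty p.1),
      pvA_loop words1 words2 PySem.Dict.empty hpre.2 (fun p _ => PySem.Dict.contains_empty p.1),
      pvB_loop words2 (PySem.Dict.mk words1) hpre.2 hpre.1,
      pvB_loop words1 (PySem.Dict.mk words2) hpre.1 hpre.2]
  rfl
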